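-- pv_equiv track=rewrite | github.com/ClarinCodes/fcc-daily-coding-challenges | Python/#234 | Prank Number.py | fix_prank_number
-- ===== SOURCE A (Python) =====
-- def fix_prank_number(arr):
--     diffs = []
--     for i in range(1, len(arr)):
--         diffs.append(arr[i] - arr[i - 1])
--
--     expected_diff = max(diffs, key=diffs.count)
--
--     if len(arr) > 2:
--         if (arr[1] - arr[0] != expected_diff) and (arr[2] - arr[1] == expected_diff):
--             arr[0] = arr[1] - expected_diff
--
--     corrected = [arr[0]]
--     for i in range(1, len(arr)):
--         last = corrected[-1]
--         if arr[i] - last == expected_diff: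
--             corrected.append(arr[i])
--         else:
--             corrected.append(last + expected_diff)
--
--     return corrected
-- ===== SOURCE B (Python) =====
-- def fix_prank_number(arr):
--     diffs = [b - a for a, b in zip(arr, arr[1:])]
--     counts = {}
--     for d in diffs:
--         counts[d] = counts.get(d, 0) + 1
--     best = diffs[0]
--     for d in diffs[1:]:
--         if counts[best] < counts[d]:
--             best = d
--     start = arr[0]
--     if len(arr) > 2 and arr[1] - arr[0] != best and arr[2] - arr[1] == best:
--         start = arr[1] - best
--     return [start + i * best for i in range(len(arr))]
-- ===== Notes on version B (the rewrite author's own statement) =====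
-- stated objective: faster
-- what changed: Replaces max(diffs, key=diffs.count) (an O(n) count scan per element) with a dict of counts built in one pass, and replaces the branchy reconstruction loop with a closed-form arithmetic progression [start + i*d], since both branches of A's loop always append last+d.
import Mathlib
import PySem

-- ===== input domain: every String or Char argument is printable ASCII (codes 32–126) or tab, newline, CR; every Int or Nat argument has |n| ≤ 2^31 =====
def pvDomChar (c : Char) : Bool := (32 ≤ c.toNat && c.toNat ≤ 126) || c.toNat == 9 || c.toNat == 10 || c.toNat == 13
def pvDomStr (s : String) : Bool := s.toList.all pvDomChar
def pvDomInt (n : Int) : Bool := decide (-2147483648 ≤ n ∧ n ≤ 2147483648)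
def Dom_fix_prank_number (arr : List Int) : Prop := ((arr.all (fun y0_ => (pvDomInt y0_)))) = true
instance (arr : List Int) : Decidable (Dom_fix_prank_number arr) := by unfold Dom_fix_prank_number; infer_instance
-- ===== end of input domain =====

-- B builds the difference counts once in a dict instead of A's repeated diffs.count scans, and
-- returns the closed-form progression [start + i*d] instead of A's element-by-element repair loop;
-- equivalence is about the RETURN value only (Python A mutates arr[0] in place on one branch).

-- ===== PORT A =====
def fix_prank_number (arr : List Int) : List Int :=
  let diffs := (PySem.List.pyRange 1 (arr.length : Int)).map
      (fun i => PySem.List.pyGetD arr i 0 - PySem.List.pyGetD arr (i - 1) 0)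
  match PySem.List.max? diffs (fun x => diffs.count x) with
  | none => []
  | some d =>
    let arr2 :=
      if 2 < arr.length ∧ PySem.List.pyGetD arr 1 0 - PySem.List.pyGetD arr 0 0 ≠ d ∧
          PySem.List.pyGetD arr 2 0 - PySem.List.pyGetD arr 1 0 = d
      then arr.set 0 (PySem.List.pyGetD arr 1 0 - d) else arr
    (PySem.List.pyRange 1 (arr2.length : Int)).foldl
      (fun corrected i =>
        if PySem.List.pyGetD arr2 i 0 - PySem.List.pyGetD corrected (-1) 0 = d then
          corrected ++ [PySem.List.pyGetD arr2 i 0]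
        else corrected ++ [PySem.List.pyGetD corrected (-1) 0 + d])
      [PySem.List.pyGetD arr2 0 0]

-- ===== PORT B =====
def fix_prank_number_alt (arr : List Int) : List Int :=
  let diffs := (arr.zip (arr.drop 1)).map (fun p => p.2 - p.1)
  let counts := diffs.foldl (fun c x => c.insert x (c.getD x 0 + 1)) (PySem.Dict.empty : PySem.Dict Int Int)
  match diffs with
  | [] => []
  | h :: t =>
    let best := t.foldl (fun b x => if counts.getD b 0 < counts.getD x 0 then x else b) h
    let start :=
      if 2 < arr.length ∧ PySem.List.pyGetD arr 1 0 - PySem.List.pyGetD arr 0 0 ≠ best ∧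
          PySem.List.pyGetD arr 2 0 - PySem.List.pyGetD arr 1 0 = best
      then PySem.List.pyGetD arr 1 0 - best else PySem.List.pyGetD arr 0 0
    (List.range arr.length).map (fun (i : Nat) => start + (i : Int) * best)

-- ===== PRECONDITION & SPEC =====
-- Python A raises ValueError (max() of an empty sequence) whenever len(arr) < 2; B raises there too.
def Pre_fix_prank_number (arr : List Int) : Prop := 2 ≤ arr.length
instance (arr : List Int) : Decidable (Pre_fix_prank_number arr) := by unfold Pre_fix_prank_number; infer_instance
def pvWitness_fix_prank_number : List Int := [1, 2, 4]
def Spec_fix_prank_number (arr : List Int) (out : List Int) : Prop := out = fix_prank_number_alt arr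
instance (arr : List Int) (out : List Int) : Decidable (Spec_fix_prank_number arr out) := by unfold Spec_fix_prank_number; infer_instance

-- ===== CLAIM (what is proved, stated in full; the proofs are below) =====
def Claim_equal_fix_prank_number : Prop := ∀ (arr : List Int), Dom_fix_prank_number arr → Pre_fix_prank_number arr → Spec_fix_prank_number arr (fix_prank_number arr)

-- ===== LEMMAS AND PROOFS =====
lemma diffs_len (arr : List Int) :
    ((PySem.List.pyRange 1 (arr.length : Int)).map
        (fun i => PySem.List.pyGetD arr i 0 - PySem.List.pyGetD arr (i - 1) 0)).length
      = ((arr.zip (arr.drop 1)).map (fun p => p.2 - p.1)).length := by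
  simp [PySem.List.pyRange]
  rcases arr with _ | ⟨a, l⟩
  · simp
  · simp
    intro h
    simp [h]

lemma diffs_eq (arr : List Int) :
    (PySem.List.pyRange 1 (arr.length : Int)).map
        (fun i => PySem.List.pyGetD arr i 0 - PySem.List.pyGetD arr (i - 1) 0)
      = (arr.zip (arr.drop 1)).map (fun p => p.2 - p.1) := by
  apply List.ext_getElem (diffs_len arr)
  intro i h1 h2
  simp [PySem.List.pyRange] at h1 ⊢
  have hlen : i + 1 < arr.length := by simp at h2; omega
  have hc : (1 + (i:Int)) = ((i+1 : Nat) : Int) := by push_cast; ring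
  rw [hc, PySem.List.pyGetD_natCast]
  rw [List.getD_eq_getElem?_getD, List.getElem?_eq_getElem hlen,
      List.getElem?_eq_getElem (Nat.lt_of_succ_lt hlen)]
  simp

lemma max_fold_eq (kA : Int → Nat) (kB : Int → Int) (hk : ∀ x, (kA x : Int) = kB x) :
    ∀ (t : List Int) (h : Int),
      t.foldl (fun acc x => match acc with
          | none => some x
          | some m => if kA m < kA x then some x else some m) (some h)
        = some (t.foldl (fun b x => if kB b < kB x then x else b) h) := by
  intro t
  induction t with
  | nil => intro h; rfl
  | cons y t ih =>
    intro h
    simp only [List.foldl_cons]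
    have : (kA h < kA y) ↔ (kB h < kB y) := by rw [← hk, ← hk]; exact_mod_cast Iff.rfl
    by_cases hc : kB h < kB y
    · rw [if_pos (this.mpr hc), if_pos hc]; exact ih y
    · rw [if_neg (fun hh => hc (this.mp hh)), if_neg hc]; exact ih h

lemma max?_cons (h : Int) (t : List Int) (key : Int → Nat) :
    PySem.List.max? (h :: t) key
      = t.foldl (fun acc x => match acc with
          | none => some x
          | some m => if key m < key x then some x else some m) (some h) := by
  have : PySem.List.max? (h :: t) key
      = (h :: t).foldl (fun acc x => match acc with
          | none => some x
          | some m => if key m < key x then some x else some m) none := by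
    unfold PySem.List.max?
    apply PySem.List.foldl_congr_mem
    intro acc x _
    cases acc <;> rfl
  rw [this, List.foldl_cons]

lemma loopA_closed (L : List Int) (d s : Int) :
    ∀ (n : Nat), 1 ≤ n →
      (PySem.List.pyRange 1 (n : Int)).foldl
        (fun corrected i =>
          if PySem.List.pyGetD L i 0 - PySem.List.pyGetD corrected (-1) 0 = d then
            corrected ++ [PySem.List.pyGetD L i 0]
          else corrected ++ [PySem.List.pyGetD corrected (-1) 0 + d])
        [s]
      = (List.range n).map (fun (i : Nat) => s + (i : Int) * d) := by
  intro n
  induction n with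
  | zero => intro h; omega
  | succ n ih =>
    intro _
    by_cases hn : 1 ≤ n
    · have hcast : ((n + 1 : Nat) : Int) = (n : Int) + 1 := by push_cast; ring
      rw [hcast, PySem.List.pyRange_one_succ_right (by exact_mod_cast hn), List.foldl_append,
          ih hn]
      set c := (List.range n).map (fun (i : Nat) => s + (i : Int) * d) with hc
      have hlen : c.length = n := by rw [hc]; simp
      have hne : c ≠ [] := by intro hh; rw [hh] at hlen; simp at hlen; omega
      have hlast : PySem.List.pyGetD c (-1) 0 = s + ((n : Int) - 1) * d := by
        rw [PySem.List.pyGetD_neg_one c 0 hne]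
        simp only [List.getLast_eq_getElem]
        simp only [hc, List.getElem_map, List.getElem_range, List.length_map, List.length_range]
        have h2 : ((n - 1 : Nat) : Int) = (n : Int) - 1 := by omega
        rw [h2]
      simp only [List.foldl_cons, List.foldl_nil]
      rw [List.range_succ, List.map_append, ← hc]
      simp only [hlast]
      have hfn : List.map (fun (i : Nat) => s + (i : Int) * d) [n]
          = [s + ((n:Int) - 1) * d + d] := by simp; ring
      rw [hfn]
      split_ifs with hif
      · have : PySem.List.pyGetD L (n : Int) 0 = s + ((n:Int) - 1) * d + d := by omega
        rw [this]
      · rfl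
    · have hn0 : n = 0 := by omega
      subst hn0
      have : PySem.List.pyRange 1 ((1:Nat) : Int) = [] := by decide
      rw [this]
      simp

lemma pyGetD_set_zero (arr : List Int) (v : Int) (h : 2 ≤ arr.length) :
    PySem.List.pyGetD (arr.set 0 v) 0 0 = v := by
  rw [PySem.List.pyGetD_ofNat']
  rcases arr with _ | ⟨a, l⟩
  · simp at h
  · rfl

lemma body_eq (arr : List Int) (d0 : Int) (hpre : 2 ≤ arr.length) :
    List.foldl
      (fun corrected i =>
        if PySem.List.pyGetD
              (if 2 < arr.length ∧ PySem.List.pyGetD arr 1 0 - PySem.List.pyGetD arr 0 0 ≠ d0 ∧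
                  PySem.List.pyGetD arr 2 0 - PySem.List.pyGetD arr 1 0 = d0
               then arr.set 0 (PySem.List.pyGetD arr 1 0 - d0) else arr) i 0
            - PySem.List.pyGetD corrected (-1) 0 = d0 then
          corrected ++ [PySem.List.pyGetD
              (if 2 < arr.length ∧ PySem.List.pyGetD arr 1 0 - PySem.List.pyGetD arr 0 0 ≠ d0 ∧
                  PySem.List.pyGetD arr 2 0 - PySem.List.pyGetD arr 1 0 = d0
               then arr.set 0 (PySem.List.pyGetD arr 1 0 - d0) else arr) i 0]
        else corrected ++ [PySem.List.pyGetD corrected (-1) 0 + d0])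
      [PySem.List.pyGetD
          (if 2 < arr.length ∧ PySem.List.pyGetD arr 1 0 - PySem.List.pyGetD arr 0 0 ≠ d0 ∧
              PySem.List.pyGetD arr 2 0 - PySem.List.pyGetD arr 1 0 = d0
           then arr.set 0 (PySem.List.pyGetD arr 1 0 - d0) else arr) 0 0]
      (PySem.List.pyRange 1
        ((if 2 < arr.length ∧ PySem.List.pyGetD arr 1 0 - PySem.List.pyGetD arr 0 0 ≠ d0 ∧
              PySem.List.pyGetD arr 2 0 - PySem.List.pyGetD arr 1 0 = d0
          then arr.set 0 (PySem.List.pyGetD arr 1 0 - d0) else arr).length : Int))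
    = List.map (fun (i : Nat) =>
        (if 2 < arr.length ∧ PySem.List.pyGetD arr 1 0 - PySem.List.pyGetD arr 0 0 ≠ d0 ∧
            PySem.List.pyGetD arr 2 0 - PySem.List.pyGetD arr 1 0 = d0
         then PySem.List.pyGetD arr 1 0 - d0 else PySem.List.pyGetD arr 0 0) + (i : Int) * d0)
        (List.range arr.length) := by
  by_cases hC : 2 < arr.length ∧ PySem.List.pyGetD arr 1 0 - PySem.List.pyGetD arr 0 0 ≠ d0 ∧
      PySem.List.pyGetD arr 2 0 - PySem.List.pyGetD arr 1 0 = d0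
  · simp only [if_pos hC, List.length_set]
    rw [loopA_closed _ d0 _ arr.length (by omega)]
    rw [pyGetD_set_zero arr _ hpre]
  · simp only [if_neg hC]
    rw [loopA_closed arr d0 _ arr.length (by omega)]


-- ===== VERDICT (by name: the statement is the Claim_ definition above) =====
theorem fix_prank_number_spec : Claim_equal_fix_prank_number := by
  intro arr _ hpre
  unfold Pre_fix_prank_number at hpre
  unfold Spec_fix_prank_number
  have hDlen : ((arr.zip (arr.drop 1)).map (fun p => p.2 - p.1)).length = arr.length - 1 := by
    rw [List.length_map, List.length_zip, List.length_drop]; omega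
  obtain ⟨h, t, hD⟩ : ∃ h t, (arr.zip (arr.drop 1)).map (fun p => p.2 - p.1) = h :: t := by
    rcases hE : (arr.zip (arr.drop 1)).map (fun p => p.2 - p.1) with _ | ⟨h, t⟩
    · exfalso; rw [hE] at hDlen; simp at hDlen; all_goals omega
    · exact ⟨h, t, hE⟩
  have hk : ∀ x : Int, (((h :: t).count x : Nat) : Int)
      = ((h :: t).foldl (fun c x => c.insert x (c.getD x 0 + 1)) (PySem.Dict.empty : PySem.Dict Int Int)).getD x 0 := by
    intro x
    rw [PySem.Dict.getD_foldl_insert_add_one]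
    simp [PySem.Dict.empty, PySem.Dict.getD, PySem.Dict.get?]
  unfold fix_prank_number fix_prank_number_alt
  simp only [diffs_eq arr, hD]
  rw [max?_cons, max_fold_eq _ _ hk]
  split
  next heq => exact absurd heq (by simp)
  next d heq =>
    replace heq := Option.some.inj heq
    subst heq
    generalize hg : List.foldl (fun b x =>
      if (List.foldl (fun c x => c.insert x (c.getD x 0 + 1))
            (PySem.Dict.empty : PySem.Dict Int Int) (h :: t)).getD b 0
          < (List.foldl (fun c x => c.insert x (c.getD x 0 + 1))
            (PySem.Dict.empty : PySem.Dict Int Int) (h :: t)).getD x 0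
      then x else b) h t = d0
    exact body_eq arr d0 hpre
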